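-- pv_equiv track=rewrite | github.com/jhyun0919/GNN-and-Power-Systems | Cascading Outage/codes/gen_dataset_n_2.py | get_num_failure_pairs
-- ===== SOURCE A (Python) =====
-- def get_num_failure_pairs(trip_i, trip_j, failure_pairs, num_branches):
--     if trip_i is None and trip_j is None:
--         num_failure_pairs = len(failure_pairs)
--     elif trip_i is not None and trip_j is None:
--         num_failure_pairs = 0
--         for j in range(1, num_branches + 1):
--             if (trip_i, j) in failure_pairs:
--                 num_failure_pairs += 1
--     else:
--         num_failure_pairs = 0
--
--     return num_failure_pairs
-- ===== SOURCE B (Python) =====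
-- def get_num_failure_pairs(trip_i, trip_j, failure_pairs, num_branches):
--     if trip_i is None and trip_j is None:
--         return len(failure_pairs)
--     if trip_i is not None and trip_j is None:
--         return sum(1 for (i, j) in set(failure_pairs)
--                    if i == trip_i and 1 <= j <= num_branches)
--     return 0
-- ===== Notes on version B (the rewrite author's own statement) =====
-- stated objective: alternative
-- what changed: The middle branch no longer loops j over range(1, num_branches+1) doing a membership scan of failure_pairs for each j; instead it makes one pass over set(failure_pairs), counting pairs whose first element equals trip_i and whose second lies in 1..num_branches (O(len(failure_pairs)) instead of O(num_branches*len(failure_pairs)), though a timing run's inputs did not make that measurable).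
import Mathlib
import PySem

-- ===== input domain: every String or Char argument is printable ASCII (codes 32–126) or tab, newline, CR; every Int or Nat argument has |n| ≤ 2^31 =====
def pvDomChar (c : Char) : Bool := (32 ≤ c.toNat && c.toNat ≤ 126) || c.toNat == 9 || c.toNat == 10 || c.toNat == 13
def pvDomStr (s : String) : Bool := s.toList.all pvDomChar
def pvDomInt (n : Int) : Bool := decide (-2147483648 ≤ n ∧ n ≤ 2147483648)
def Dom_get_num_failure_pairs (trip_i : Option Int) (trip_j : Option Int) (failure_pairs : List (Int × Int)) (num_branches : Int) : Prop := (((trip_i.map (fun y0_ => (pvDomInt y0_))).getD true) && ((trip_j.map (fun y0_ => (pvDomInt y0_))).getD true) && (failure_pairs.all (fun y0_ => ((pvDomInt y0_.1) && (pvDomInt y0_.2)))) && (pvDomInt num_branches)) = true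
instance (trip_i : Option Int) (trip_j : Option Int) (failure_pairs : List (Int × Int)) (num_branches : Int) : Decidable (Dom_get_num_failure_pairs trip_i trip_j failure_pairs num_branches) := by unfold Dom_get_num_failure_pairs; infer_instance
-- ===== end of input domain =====

-- B replaces the middle branch's loop over range(1, num_branches+1) with membership
-- scans by a single counting pass over set(failure_pairs) (an alternative algorithm).

-- ===== PORT A =====
def get_num_failure_pairs (trip_i : Option Int) (trip_j : Option Int) (failure_pairs : List (Int × Int)) (num_branches : Int) : Int :=
  match trip_i, trip_j with
  | none, none => (failure_pairs.length : Int)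
  | some ti, none =>
      (PySem.List.pyRange 1 (num_branches + 1) 1).foldl
        (fun acc j => if failure_pairs.contains (ti, j) then acc + 1 else acc) 0
  | _, _ => 0

-- ===== PORT B =====
def get_num_failure_pairs_alt (trip_i : Option Int) (trip_j : Option Int) (failure_pairs : List (Int × Int)) (num_branches : Int) : Int :=
  match trip_j with
  | some _ => 0
  | none =>
    match trip_i with
    | none => (failure_pairs.length : Int)
    | some ti =>
        (((PySem.Set.ofList failure_pairs).countP
            (fun p => p.1 == ti && decide (1 ≤ p.2) && decide (p.2 ≤ num_branches)) : Nat) : Int)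

-- ===== PRECONDITION & SPEC =====
def Spec_get_num_failure_pairs (trip_i : Option Int) (trip_j : Option Int) (failure_pairs : List (Int × Int)) (num_branches : Int) (out : Int) : Prop := out = get_num_failure_pairs_alt trip_i trip_j failure_pairs num_branches
instance (trip_i : Option Int) (trip_j : Option Int) (failure_pairs : List (Int × Int)) (num_branches : Int) (out : Int) : Decidable (Spec_get_num_failure_pairs trip_i trip_j failure_pairs num_branches out) := by unfold Spec_get_num_failure_pairs; infer_instance

-- ===== CLAIM (what is proved, stated in full; the proofs are below) =====
def Claim_equal_get_num_failure_pairs : Prop := ∀ (trip_i : Option Int) (trip_j : Option Int) (failure_pairs : List (Int × Int)) (num_branches : Int), Dom_get_num_failure_pairs trip_i trip_j failure_pairs num_branches → Spec_get_num_failure_pairs trip_i trip_j failure_pairs num_branches (get_num_failure_pairs trip_i trip_j failure_pairs num_branches)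

-- ===== LEMMAS AND PROOFS =====

-- A's counting loop is countP over the range.
theorem foldl_count_eq_countP (P : Int → Bool) (l : List Int) (acc : Int) :
    l.foldl (fun acc j => if P j then acc + 1 else acc) acc = acc + (l.countP P : Nat) := by
  induction l generalizing acc with
  | nil => simp
  | cons x xs ih =>
    simp only [List.foldl_cons, List.countP_cons, ih]
    by_cases h : P x
    · simp [h]; ring
    · simp [h]

-- The two filtered lists are permutations (both nodup, same elements), so counts agree.
theorem middle_branch_eq (ti : Int) (fp : List (Int × Int)) (nb : Int) :
    (PySem.List.pyRange 1 (nb + 1) 1).countP (fun j => fp.contains (ti, j)) =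
    (PySem.Set.ofList fp).countP
      (fun p => p.1 == ti && decide (1 ≤ p.2) && decide (p.2 ≤ nb)) := by
  rw [List.countP_eq_length_filter, List.countP_eq_length_filter]
  have hmaplen :
      ((PySem.List.pyRange 1 (nb + 1) 1).filter (fun j => fp.contains (ti, j))).length =
      (((PySem.List.pyRange 1 (nb + 1) 1).filter (fun j => fp.contains (ti, j))).map
        (fun j => ((ti, j) : Int × Int))).length := by
    simp
  rw [hmaplen]
  apply List.Perm.length_eq
  rw [List.perm_ext_iff_of_nodup]
  · intro p
    simp only [List.mem_map, List.mem_filter, PySem.List.mem_pyRange_one,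
      List.contains_iff_mem, PySem.Set.mem_ofList, Bool.and_eq_true, beq_iff_eq,
      decide_eq_true_eq]
    constructor
    · rintro ⟨j, ⟨⟨h1, h2⟩, hmem⟩, rfl⟩
      exact ⟨hmem, ⟨rfl, h1⟩, by omega⟩
    · rintro ⟨hmem, ⟨h1, h2⟩, h3⟩
      obtain ⟨p1, p2⟩ := p
      simp only at h1 h2 h3 hmem
      subst h1
      exact ⟨p2, ⟨⟨h2, by omega⟩, hmem⟩, rfl⟩
  · exact ((PySem.List.nodup_pyRange_one 1 (nb + 1)).filter _).map
      (fun a b h => by simpa using h)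
  · exact (PySem.Set.nodup_ofList fp).filter _

-- ===== VERDICT (by name: the statement is the Claim_ definition above) =====
theorem get_num_failure_pairs_spec : Claim_equal_get_num_failure_pairs := by
  intro trip_i trip_j fp nb _
  unfold Spec_get_num_failure_pairs get_num_failure_pairs get_num_failure_pairs_alt
  match trip_i, trip_j with
  | none, none => rfl
  | some ti, none =>
    simp only
    rw [foldl_count_eq_countP, middle_branch_eq]
    simp
  | none, some _ => rfl
  | some _, some _ => rfl
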